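-- pv_equiv track=rewrite | github.com/nugongja/Algorithm | 프로그래머스/2/12914. 멀리 뛰기/멀리 뛰기.py | solution
-- ===== SOURCE A (Python) =====
-- from math import comb
--
-- def solution(n):
--     answer = 0
--
--     one = n
--     two = 0
--     while one >= 0:
--         answer += comb(one+two, two)
--         one -= 2
--         two += 1
--
--
--     return answer%1234567
-- ===== SOURCE B (Python) =====
-- def solution(n):
--     if n < 0:
--         return 0
--     a, b = 0, 1
--     for _ in range(n + 1):
--         a, b = b, (a + b) % 1234567
--     return a
-- ===== Notes on version B (the rewrite author's own statement) =====
-- stated objective: faster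
-- what changed: Replaces the loop that recomputes a big-integer binomial coefficient at every step with an iterative modular Fibonacci pair update (the sum of diagonal binomials is Fib(n+1)), reducing everything to O(1)-size arithmetic per step.
import Mathlib
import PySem

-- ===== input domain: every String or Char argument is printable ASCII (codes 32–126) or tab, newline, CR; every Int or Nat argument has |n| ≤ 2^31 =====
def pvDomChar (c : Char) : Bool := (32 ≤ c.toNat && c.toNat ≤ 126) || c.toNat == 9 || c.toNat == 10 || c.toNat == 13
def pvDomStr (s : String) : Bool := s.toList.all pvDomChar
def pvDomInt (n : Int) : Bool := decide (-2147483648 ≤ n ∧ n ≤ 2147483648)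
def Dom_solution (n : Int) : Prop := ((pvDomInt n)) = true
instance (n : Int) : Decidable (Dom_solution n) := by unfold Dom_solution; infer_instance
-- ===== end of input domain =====

-- B replaces A's per-step big-integer binomial computation by an iterative modular
-- Fibonacci pair update (Σ diagonal binomials = Fib(n+1)); objective: faster.

-- ===== PORT A =====
-- math.comb a b; exact here: in A's loop both arguments are always ≥ 0
def pyComb (a b : Int) : Int := (Nat.choose a.toNat b.toNat : Int)

-- the while loop: state (one, two, answer)
def solLoopA (one two answer : Int) : Int :=
  if one ≥ 0 then
    solLoopA (one - 2) (two + 1) (answer + pyComb (one + two) two)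
  else answer
termination_by (one + 2).toNat
decreasing_by omega

def solution (n : Int) : Int :=
  PySem.Int.mod (solLoopA n 0 0) 1234567

-- ===== PORT B =====
def solution_alt (n : Int) : Int :=
  if n < 0 then 0
  else
    let p := (PySem.List.pyRange 0 (n + 1) 1).foldl
      (fun (ab : Int × Int) _ => (ab.2, PySem.Int.mod (ab.1 + ab.2) 1234567)) (0, 1)
    p.1

-- ===== PRECONDITION & SPEC =====
def Spec_solution (n : Int) (out : Int) : Prop := out = solution_alt n
instance (n : Int) (out : Int) : Decidable (Spec_solution n out) := by unfold Spec_solution; infer_instance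

-- ===== CLAIM (what is proved, stated in full; the proofs are below) =====
def Claim_equal_solution : Prop := ∀ (n : Int), Dom_solution n → Spec_solution n (solution n)

-- ===== LEMMAS AND PROOFS =====

-- Nat-level shadow of A's loop sum
def Tsum : Nat → Nat → Nat
  | 0, t => Nat.choose t t
  | 1, t => Nat.choose (1 + t) t
  | (m + 2), t => Nat.choose (m + 2 + t) t + Tsum m (t + 1)

lemma solLoopA_eq_Tsum : ∀ (m t : Nat) (a : Int),
    solLoopA (m : Int) (t : Int) a = a + (Tsum m t : Int) := by
  intro m
  induction m using Nat.strong_induction_on with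
  | _ m ih =>
    intro t a
    match m with
    | 0 =>
      rw [solLoopA, if_pos (by omega), solLoopA, if_neg (by omega)]
      simp [Tsum, pyComb]
    | 1 =>
      rw [solLoopA, if_pos (by omega), solLoopA, if_neg (by omega)]
      have h : ((1 : Int) + (t : Int)).toNat = 1 + t := by omega
      simp [Tsum, pyComb, h]
    | (k + 2) =>
      rw [solLoopA, if_pos (by omega)]
      have h1 : ((k + 2 : Nat) : Int) - 2 = ((k : Nat) : Int) := by push_cast; ring
      have h2 : ((t : Nat) : Int) + 1 = ((t + 1 : Nat) : Int) := by push_cast; ring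
      rw [h1, h2, ih k (by omega)]
      simp only [Tsum, pyComb]
      have ha : (((k + 2 : Nat) : Int) + (t : Int)).toNat = k + 2 + t := by omega
      have hb : ((t : Int)).toNat = t := by omega
      rw [ha, hb]
      push_cast
      ring

lemma Tsum_eq_sum : ∀ (m t : Nat),
    Tsum m t = ∑ j ∈ Finset.range (m + 1), Nat.choose (m + t - j) (t + j) := by
  intro m
  induction m using Nat.strong_induction_on with
  | _ m ih =>
    intro t
    match m with
    | 0 => simp [Tsum]
    | 1 =>
      rw [Tsum, Finset.sum_range_succ, Finset.sum_range_one]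
      simp
    | (k + 2) =>
      rw [Tsum, ih k (by omega) (t + 1)]
      -- shift the index on the RHS sum: the j = 0 term is the head binomial
      have hshift : ∀ j ∈ Finset.range (k + 2),
          Nat.choose (k + 2 + t - (j + 1)) (t + (j + 1))
            = Nat.choose (k + (t + 1) - j) ((t + 1) + j) := by
        intro j hj
        congr 1 <;> omega
      have hs : (∑ j ∈ Finset.range (k + 2), Nat.choose (k + 2 + t - (j + 1)) (t + (j + 1)))
          = ∑ j ∈ Finset.range (k + 2), Nat.choose (k + (t + 1) - j) ((t + 1) + j) :=
        Finset.sum_congr rfl hshift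
      have hlast : Nat.choose (k + (t + 1) - (k + 1)) ((t + 1) + (k + 1)) = 0 :=
        Nat.choose_eq_zero_of_lt (by omega)
      conv_rhs => rw [Finset.sum_range_succ']
      rw [hs]
      conv_rhs => rw [Finset.sum_range_succ]
      rw [hlast]
      simp only [Nat.sub_zero, Nat.add_zero]
      omega

lemma Tsum_zero_eq_fib (m : Nat) : Tsum m 0 = Nat.fib (m + 1) := by
  rw [Tsum_eq_sum, Nat.fib_succ_eq_sum_choose,
    Finset.Nat.sum_antidiagonal_eq_sum_range_succ_mk]
  conv_rhs => rw [← Finset.sum_range_reflect]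
  refine Finset.sum_congr rfl ?_
  intro j hj
  simp only [Finset.mem_range] at hj
  congr 1
  omega

-- B's fold over range(n+1) computes the Fibonacci pair mod 1234567
lemma fold_fib (m : Nat) :
    (PySem.List.pyRange 0 (m : Int) 1).foldl
      (fun (ab : Int × Int) _ => (ab.2, PySem.Int.mod (ab.1 + ab.2) 1234567)) (0, 1)
    = ((Nat.fib m : Int) % 1234567, (Nat.fib (m + 1) : Int) % 1234567) := by
  induction m with
  | zero => simp
  | succ k ih =>
    have : ((k + 1 : Nat) : Int) = (k : Int) + 1 := by push_cast; ring
    rw [this, PySem.List.pyRange_one_succ_right (by positivity), List.foldl_append, ih]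
    simp only [List.foldl_cons, List.foldl_nil, Prod.mk.injEq]
    refine ⟨trivial, ?_⟩
    rw [PySem.Int.mod_eq_emod_of_pos (by norm_num),
      show k + 1 + 1 = k + 2 from rfl, Nat.fib_add_two]
    push_cast
    conv_rhs => rw [Int.add_emod]

-- ===== VERDICT (by name: the statement is the Claim_ definition above) =====
theorem solution_spec : Claim_equal_solution := by
  intro n _
  unfold Spec_solution solution solution_alt
  by_cases hn : n < 0
  · rw [if_pos hn, solLoopA, if_neg (by omega)]
    simp [PySem.Int.mod]
  · rw [if_neg hn]
    have hn' : 0 ≤ n := by omega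
    obtain ⟨m, rfl⟩ := Int.eq_ofNat_of_zero_le hn'
    have h1 : ((m : Int) + 1) = ((m + 1 : Nat) : Int) := by push_cast; ring
    rw [h1, fold_fib (m + 1)]
    have hA := solLoopA_eq_Tsum m 0 0
    simp only [Nat.cast_zero, zero_add] at hA
    rw [hA, Tsum_zero_eq_fib]
    rw [PySem.Int.mod_eq_emod_of_pos (by norm_num)]
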